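-- pv_equiv track=rewrite | github.com/MattTriano/loci_platform | platform/airflow/dags/loci/collectors/tiger/spec.py | _default_entity_key
-- ===== SOURCE A (Python) =====
-- _CANDIDATE_ID_COLUMNS = [
--     "geoid",
--     "geoidfq",
--     "linearid",
--     "tlid",
--     "areaid",
-- ]
--
-- def _default_entity_key(
--     schema: dict,
--     lowercase: bool,
-- ) -> list[str] | None:
--     """
--     Detect a default entity key from the shapefile schema columns.
--
--     Checks for known TIGER ID column names in priority order. Matches
--     both exact names (e.g. "geoid") and year-suffixed variants (e.g.
--     "geoid20") that appear in decennial census layers.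
--
--     Returns [id_column, "vintage"] if a match is found, or None if the
--     schema has no recognizable ID column.
--     """
--     col_names_lower = [k.lower() for k in schema]
--     original_names = list(schema.keys())
--
--     for candidate in _CANDIDATE_ID_COLUMNS:
--         for col_lower, col_original in zip(col_names_lower, original_names):
--             if col_lower == candidate or col_lower.startswith(candidate):
--                 col_name = col_lower if lowercase else col_original
--                 return [col_name, "vintage"]
--
--     return None
-- ===== SOURCE B (Python) =====
-- _CANDIDATE_ID_COLUMNS = [
--     "geoid",
--     "geoidfq",
--     "linearid",
--     "tlid",
--     "areaid",
-- ]
--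
-- def _default_entity_key(
--     schema: dict,
--     lowercase: bool,
-- ) -> list[str] | None:
--     # Single pass over the schema columns: track the column whose first matching
--     # candidate has the smallest priority index (earliest column wins ties).
--     best_i = None
--     best_col = None
--     for col in schema:
--         low = col.lower()
--         i = 0
--         for cand in _CANDIDATE_ID_COLUMNS:
--             if low.startswith(cand):
--                 if best_i is None or i < best_i:
--                     best_i = i
--                     best_col = col
--                 break
--             i += 1
--     if best_col is None:
--         return None
--     return [best_col.lower() if lowercase else best_col, "vintage"]
-- ===== Notes on version B (the rewrite author's own statement) =====
-- stated objective: alternative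
-- what changed: Replaced the candidate-outer/column-inner double loop (which rescans the schema once per candidate) with a single pass over the schema columns that tracks the best (smallest) candidate priority index seen so far, with strict-less update to keep A's earliest-column tie-break.
import Mathlib
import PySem

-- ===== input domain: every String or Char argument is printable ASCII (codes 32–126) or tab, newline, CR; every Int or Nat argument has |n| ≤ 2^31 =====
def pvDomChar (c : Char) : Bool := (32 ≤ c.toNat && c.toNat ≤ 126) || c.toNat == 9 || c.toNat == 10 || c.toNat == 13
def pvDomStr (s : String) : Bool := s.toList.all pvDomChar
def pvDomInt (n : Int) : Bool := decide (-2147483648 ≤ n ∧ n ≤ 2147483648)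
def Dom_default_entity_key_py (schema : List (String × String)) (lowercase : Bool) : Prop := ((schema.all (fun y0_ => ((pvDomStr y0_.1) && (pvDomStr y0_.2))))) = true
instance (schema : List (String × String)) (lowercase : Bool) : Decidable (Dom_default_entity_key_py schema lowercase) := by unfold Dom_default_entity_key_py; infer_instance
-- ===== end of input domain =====

-- B replaces A's candidate-outer/column-inner double loop by a single pass over the
-- schema tracking the smallest candidate index (alternative decomposition, same cost).

def pvCandidates : List String := ["geoid", "geoidfq", "linearid", "tlid", "areaid"]

-- ===== PORT A =====
-- inner 'for col_lower, col_original in zip(...)' loop with its early return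
def pvAInner (lowercase : Bool) (cand : String) : List (String × String) → Option (List String)
  | [] => none
  | (lw, orig) :: rest =>
    if lw == cand || PySem.Str.startswith lw cand then
      some [(if lowercase then lw else orig), "vintage"]
    else pvAInner lowercase cand rest

-- outer 'for candidate in _CANDIDATE_ID_COLUMNS' loop
def pvAOuter (lowercase : Bool) (pairs : List (String × String)) : List String → Option (List String)
  | [] => none
  | c :: cs =>
    match pvAInner lowercase c pairs with
    | some r => some r
    | none => pvAOuter lowercase pairs cs

def default_entity_key_py (schema : List (String × String)) (lowercase : Bool) : Option (List String) :=
  let col_names_lower := schema.map (fun k => PySem.Str.lower k.1)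
  let original_names := schema.map Prod.fst
  pvAOuter lowercase (col_names_lower.zip original_names) pvCandidates

-- ===== PORT B =====
-- inner 'for cand in _CANDIDATE_ID_COLUMNS: ... break' with counter i
def pvCandIdx (low : String) : List String → Nat → Option Nat
  | [], _ => none
  | c :: cs, i => if PySem.Str.startswith low c then some i else pvCandIdx low cs (i + 1)

-- body of the single pass: update (best_i, best_col) on a strictly smaller index
def pvBStep (st : Option (Nat × String)) (col : String) : Option (Nat × String) :=
  match pvCandIdx (PySem.Str.lower col) pvCandidates 0 with
  | none => st
  | some i =>
    match st with
    | none => some (i, col)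
    | some (bi, _) => if i < bi then some (i, col) else st

def default_entity_key_py_alt (schema : List (String × String)) (lowercase : Bool) : Option (List String) :=
  match schema.foldl (fun st p => pvBStep st p.1) none with
  | none => none
  | some (_, col) => some [(if lowercase then PySem.Str.lower col else col), "vintage"]

-- ===== PRECONDITION & SPEC =====
def Spec_default_entity_key_py (schema : List (String × String)) (lowercase : Bool) (out : Option (List String)) : Prop := out = default_entity_key_py_alt schema lowercase
instance (schema : List (String × String)) (lowercase : Bool) (out : Option (List String)) : Decidable (Spec_default_entity_key_py schema lowercase out) := by unfold Spec_default_entity_key_py; infer_instance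

-- ===== CLAIM (what is proved, stated in full; the proofs are below) =====
def Claim_equal_default_entity_key_py : Prop := ∀ (schema : List (String × String)) (lowercase : Bool), Dom_default_entity_key_py schema lowercase → Spec_default_entity_key_py schema lowercase (default_entity_key_py schema lowercase)

-- ===== LEMMAS AND PROOFS =====

-- combine an earlier best with a later best: keep the earlier unless strictly smaller
def pvM (x y : Option (Nat × String)) : Option (Nat × String) :=
  match x, y with
  | none, y => y
  | x, none => x
  | some (i, c), some (j, d) => if j < i then some (j, d) else some (i, c)

def pvOpt (cands : List String) (col : String) : Option (Nat × String) :=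
  (pvCandIdx (PySem.Str.lower col) cands 0).map (fun i => (i, col))

def pvBest (cands : List String) : List String → Option (Nat × String)
  | [] => none
  | col :: rest => pvM (pvOpt cands col) (pvBest cands rest)

def pvShift (x : Option (Nat × String)) : Option (Nat × String) :=
  x.map (fun p => (p.1 + 1, p.2))

def pvRender (lowercase : Bool) (x : Option (Nat × String)) : Option (List String) :=
  x.map (fun p => [(if lowercase then PySem.Str.lower p.2 else p.2), "vintage"])

def pvFindFirst (cand : String) : List String → Option String
  | [] => none
  | col :: rest =>
    if PySem.Str.startswith (PySem.Str.lower col) cand then some col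
    else pvFindFirst cand rest

theorem pvM_assoc (x y z : Option (Nat × String)) : pvM (pvM x y) z = pvM x (pvM y z) := by
  rcases x with _ | ⟨i, c⟩
  · rfl
  · rcases y with _ | ⟨j, d⟩
    · rfl
    · rcases z with _ | ⟨k, e⟩
      · by_cases h1 : j < i <;> simp [pvM, h1]
      · by_cases h1 : j < i <;> by_cases h2 : k < j <;> by_cases h3 : k < i <;>
          simp [pvM, h1, h2, h3] <;> omega

theorem pvM_zero (x : String) (y : Option (Nat × String)) : pvM (some (0, x)) y = some (0, x) := by
  rcases y with _ | ⟨j, d⟩ <;> simp [pvM]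

theorem pvM_shift (a b : Option (Nat × String)) : pvM (pvShift a) (pvShift b) = pvShift (pvM a b) := by
  rcases a with _ | ⟨i, c⟩ <;> rcases b with _ | ⟨j, d⟩ <;>
    simp only [pvM, pvShift, Option.map] <;> split_ifs <;> first | rfl | omega

theorem pvBStep_eq (st : Option (Nat × String)) (col : String) :
    pvBStep st col = pvM st (pvOpt pvCandidates col) := by
  rcases h : pvCandIdx (PySem.Str.lower col) pvCandidates 0 with _ | i <;>
    rcases st with _ | ⟨bi, bc⟩ <;> simp only [pvBStep, pvOpt, pvM, h, Option.map] <;>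
    split_ifs <;> simp_all

theorem foldl_pvM (cands : List String) (cols : List String) :
    ∀ st, cols.foldl (fun st col => pvM st (pvOpt cands col)) st = pvM st (pvBest cands cols) := by
  induction cols with
  | nil => intro st; rcases st with _ | ⟨i, c⟩ <;> simp [pvBest, pvM]
  | cons col rest ih =>
    intro st
    simp only [List.foldl_cons, pvBest, ih, pvM_assoc]

theorem pvCandIdx_succ (low : String) : ∀ (cands : List String) (i : Nat),
    pvCandIdx low cands (i + 1) = (pvCandIdx low cands i).map (fun j => j + 1) := by
  intro cands
  induction cands with
  | nil => intro i; simp [pvCandIdx]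
  | cons c cs ih =>
    intro i
    cases hx : PySem.Str.startswith low c <;>
      simp only [pvCandIdx, hx, Bool.false_eq_true, if_false, if_true, ih, Option.map_some]

theorem pvStartswith_self (s : String) : PySem.Str.startswith s s = true := by
  simp [PySem.Chars.startswith_iff]

theorem pvAInner_eq (lowercase : Bool) (cand : String) (cols : List String) :
    pvAInner lowercase cand (cols.map (fun k => (PySem.Str.lower k, k))) =
      (pvFindFirst cand cols).map
        (fun col => [(if lowercase then PySem.Str.lower col else col), "vintage"]) := by
  induction cols with
  | nil => simp [pvAInner, pvFindFirst]
  | cons col rest ih =>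
    cases hx : PySem.Str.startswith (PySem.Str.lower col) cand with
    | true =>
      have hx' : PySem.Chars.startswith (PySem.Chars.lower col.toList) cand.toList = true := by
        simpa using hx
      simp [pvAInner, pvFindFirst, hx, hx']
    | false =>
      have hne : ¬ PySem.Str.lower col = cand := by
        intro he
        rw [← he, pvStartswith_self] at hx
        exact Bool.true_eq_false.mp hx
      have hx' : PySem.Chars.startswith (PySem.Chars.lower col.toList) cand.toList = false := by
        simpa using hx
      simp [pvAInner, pvFindFirst, hx, hx', hne, ih]

theorem pvBest_nil (cols : List String) : pvBest [] cols = none := by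
  induction cols with
  | nil => rfl
  | cons col rest ih => simp [pvBest, pvOpt, pvCandIdx, pvM, ih]

theorem pvOpt_cons_pos (c : String) (cs : List String) (col : String)
    (hx : PySem.Str.startswith (PySem.Str.lower col) c = true) :
    pvOpt (c :: cs) col = some (0, col) := by
  simp only [pvOpt, pvCandIdx, hx, if_true, Option.map_some]

theorem pvOpt_cons_neg (c : String) (cs : List String) (col : String)
    (hx : PySem.Str.startswith (PySem.Str.lower col) c = false) :
    pvOpt (c :: cs) col = pvShift (pvOpt cs col) := by
  simp only [pvOpt, pvCandIdx, hx, Bool.false_eq_true, if_false, pvCandIdx_succ, pvShift]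
  rcases h : pvCandIdx (PySem.Str.lower col) cs 0 with _ | i <;> simp

theorem pvBest_found (c : String) (cs : List String) (cols : List String) (col0 : String)
    (h : pvFindFirst c cols = some col0) : pvBest (c :: cs) cols = some (0, col0) := by
  induction cols with
  | nil => simp [pvFindFirst] at h
  | cons col rest ih =>
    cases hx : PySem.Str.startswith (PySem.Str.lower col) c with
    | true =>
      rw [pvFindFirst, hx, if_pos rfl] at h
      injection h with h
      subst h
      rw [pvBest, pvOpt_cons_pos c cs col hx, pvM_zero]
    | false =>
      rw [pvFindFirst, hx] at h
      simp only [Bool.false_eq_true, if_false] at h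
      rw [pvBest, ih h, pvOpt_cons_neg c cs col hx]
      rcases hy : pvOpt cs col with _ | ⟨i, d⟩ <;> simp [pvShift, pvM, hy]

theorem pvBest_notfound (c : String) (cs : List String) (cols : List String)
    (h : pvFindFirst c cols = none) :
    pvBest (c :: cs) cols = pvShift (pvBest cs cols) := by
  induction cols with
  | nil => simp [pvBest, pvShift]
  | cons col rest ih =>
    cases hx : PySem.Str.startswith (PySem.Str.lower col) c with
    | true => rw [pvFindFirst, hx, if_pos rfl] at h; exact absurd h (by simp)
    | false =>
      rw [pvFindFirst, hx] at h
      simp only [Bool.false_eq_true, if_false] at h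
      rw [pvBest, ih h, pvOpt_cons_neg c cs col hx, pvM_shift, pvBest]

theorem pvRender_shift (lowercase : Bool) (x : Option (Nat × String)) :
    pvRender lowercase (pvShift x) = pvRender lowercase x := by
  rcases x with _ | ⟨i, c⟩ <;> simp [pvRender, pvShift]

theorem pvOuter_eq (lowercase : Bool) : ∀ (cands : List String) (cols : List String),
    pvAOuter lowercase (cols.map (fun k => (PySem.Str.lower k, k))) cands =
      pvRender lowercase (pvBest cands cols) := by
  intro cands
  induction cands with
  | nil => intro cols; simp [pvAOuter, pvBest_nil, pvRender]
  | cons c cs ih =>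
    intro cols
    rcases hf : pvFindFirst c cols with _ | col0
    · rw [pvAOuter, pvAInner_eq, hf, pvBest_notfound c cs cols hf, pvRender_shift]
      exact ih cols
    · rw [pvAOuter, pvAInner_eq, hf, pvBest_found c cs cols col0 hf]
      rfl

-- ===== VERDICT (by name: the statement is the Claim_ definition above) =====
theorem default_entity_key_py_spec : Claim_equal_default_entity_key_py := by
  intro schema lowercase _
  unfold Spec_default_entity_key_py default_entity_key_py default_entity_key_py_alt
  have hzip : (schema.map (fun k => PySem.Str.lower k.1)).zip (schema.map Prod.fst) =
      (schema.map Prod.fst).map (fun k => (PySem.Str.lower k, k)) := by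
    rw [List.zip_map']; simp [List.map_map]
  have hfold : schema.foldl (fun st p => pvBStep st p.1) none =
      pvBest pvCandidates (schema.map Prod.fst) := by
    have h1 : schema.foldl (fun st p => pvBStep st p.1) none =
        (schema.map Prod.fst).foldl (fun st col => pvM st (pvOpt pvCandidates col)) none := by
      rw [List.foldl_map]
      congr 1
      funext st p
      exact pvBStep_eq st p.1
    rw [h1, foldl_pvM]
    rfl
  show pvAOuter lowercase
      ((schema.map (fun k => PySem.Str.lower k.1)).zip (schema.map Prod.fst)) pvCandidates =
    match schema.foldl (fun st p => pvBStep st p.1) none with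
    | none => none
    | some (_, col) => some [(if lowercase then PySem.Str.lower col else col), "vintage"]
  rw [hzip, pvOuter_eq, hfold]
  rcases pvBest pvCandidates (schema.map Prod.fst) with _ | ⟨i, c⟩ <;> simp [pvRender]
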